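-- pv_equiv track=rewrite | github.com/KDT-final-project-team4/Reinforce_Learning_2048 | main.py | get_1d_mapping
-- ===== SOURCE A (Python) =====
-- def get_1d_mapping(line_vals):
--     mapping = {}
--     merged_indices = set()
--     new_line = []
--     target_idx = 0
--
--     for orig_idx, val in line_vals:
--         if len(new_line) > 0:
--             prev_target, prev_val = new_line[-1]
--             if prev_val == val and prev_target not in merged_indices:
--                 mapping[orig_idx] = prev_target
--                 new_line[-1] = (prev_target, prev_val * 2)
--                 merged_indices.add(prev_target)
--                 continue
--
--         mapping[orig_idx] = target_idx
--         new_line.append((target_idx, val))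
--         target_idx += 1
--
--     return mapping
-- ===== SOURCE B (Python) =====
-- def get_1d_mapping(line_vals):
--     items = list(line_vals)
--     mapping = {}
--     n = len(items)
--     i = 0
--     target_idx = 0
--     while i < n:
--         orig_idx, val = items[i]
--         mapping[orig_idx] = target_idx
--         if i + 1 < n and items[i + 1][1] == val:
--             mapping[items[i + 1][0]] = target_idx
--             i += 2
--         else:
--             i += 1
--         target_idx += 1
--     return mapping
-- ===== Notes on version B (the rewrite author's own statement) =====
-- stated objective: simpler
-- what changed: Replaces A's lookback machinery (new_line list, merged_indices set, merge-flag check on the last slot) with a single forward pass over the materialized list that consumes a matching pair of adjacent elements at once, mapping both to the same target index.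
import Mathlib
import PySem

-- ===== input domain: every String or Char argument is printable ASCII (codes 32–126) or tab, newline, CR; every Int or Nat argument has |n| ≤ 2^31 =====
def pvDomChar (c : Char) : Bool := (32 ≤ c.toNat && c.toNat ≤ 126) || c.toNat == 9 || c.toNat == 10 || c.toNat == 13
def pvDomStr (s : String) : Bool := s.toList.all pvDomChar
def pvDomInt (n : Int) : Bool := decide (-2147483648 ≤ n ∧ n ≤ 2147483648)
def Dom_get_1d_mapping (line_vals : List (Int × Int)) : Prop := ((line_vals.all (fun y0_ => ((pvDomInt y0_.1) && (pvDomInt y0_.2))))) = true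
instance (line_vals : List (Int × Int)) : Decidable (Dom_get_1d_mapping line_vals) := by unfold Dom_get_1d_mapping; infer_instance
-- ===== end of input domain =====

-- B replaces A's lookback (new_line list + merged_indices set + merge flagging) by a single
-- forward pass that consumes a matching pair at once; objective: simpler (no speed claim).

-- ===== PORT A =====
-- loop body of A's for-loop, named for the proofs; state = (mapping, merged_indices, new_line, target_idx)
def pvStepA (st : PySem.Dict Int Int × PySem.Set Int × List (Int × Int) × Int)
    (x : Int × Int) : PySem.Dict Int Int × PySem.Set Int × List (Int × Int) × Int :=
  match st, x with
  | (mapping, merged, new_line, target_idx), (orig_idx, val) =>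
    -- the code after the (possibly skipped-by-continue) merge branch
    let appendStep :=
      (mapping.insert orig_idx target_idx, merged, new_line ++ [(target_idx, val)], target_idx + 1)
    if new_line.length > 0 then
      match PySem.List.pyGet? new_line (-1) with   -- new_line[-1] (guarded, never none)
      | some (prev_target, prev_val) =>
        if prev_val = val ∧ prev_target ∉ merged then
          (mapping.insert orig_idx prev_target, merged.add prev_target,
           new_line.dropLast ++ [(prev_target, prev_val * 2)],   -- new_line[-1] = (pt, pv*2)
           target_idx)
        else appendStep
      | none => appendStep
    else appendStep

def get_1d_mapping (line_vals : List (Int × Int)) : List (Int × Int) :=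
  (line_vals.foldl pvStepA (PySem.Dict.empty, PySem.Set.empty, [], 0)).1.items

-- ===== PORT B =====
-- B's while-loop: consume one element, or two when the next one carries the same value
def pvGoB : List (Int × Int) → PySem.Dict Int Int → Int → PySem.Dict Int Int
  | [], mapping, _ => mapping
  | [(orig_idx, _val)], mapping, target_idx =>      -- i+1 < n fails: single placement, loop ends
    mapping.insert orig_idx target_idx
  | (orig_idx, val) :: (oj, w) :: rest', mapping, target_idx =>
    let mapping := mapping.insert orig_idx target_idx
    if w = val then pvGoB rest' (mapping.insert oj target_idx) (target_idx + 1)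
    else pvGoB ((oj, w) :: rest') mapping (target_idx + 1)

def get_1d_mapping_alt (line_vals : List (Int × Int)) : List (Int × Int) :=
  (pvGoB line_vals PySem.Dict.empty 0).items

-- ===== PRECONDITION & SPEC =====
def Spec_get_1d_mapping (line_vals : List (Int × Int)) (out : List (Int × Int)) : Prop := out = get_1d_mapping_alt line_vals
instance (line_vals : List (Int × Int)) (out : List (Int × Int)) : Decidable (Spec_get_1d_mapping line_vals out) := by unfold Spec_get_1d_mapping; infer_instance

-- ===== CLAIM (what is proved, stated in full; the proofs are below) =====
def Claim_equal_get_1d_mapping : Prop := ∀ (line_vals : List (Int × Int)), Dom_get_1d_mapping line_vals → Spec_get_1d_mapping line_vals (get_1d_mapping line_vals)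

-- ===== LEMMAS AND PROOFS =====

-- "goF": B's loop in the middle of an unmatched element — pending value v sits at target t-1,
-- next target to assign is t (proof helper; relates B's two-at-a-time loop to A's lookback loop)
def pvGoF : List (Int × Int) → Int → PySem.Dict Int Int → Int → PySem.Dict Int Int
  | [], _, m, _ => m
  | (oj, w) :: rest, v, m, t =>
    if w = v then pvGoB rest (m.insert oj (t - 1)) t
    else pvGoF rest w (m.insert oj t) (t + 1)

lemma pvGoB_cons_eq_goF (rest : List (Int × Int)) :
    ∀ (oi v : Int) (m : PySem.Dict Int Int) (t : Int),
    pvGoB ((oi, v) :: rest) m t = pvGoF rest v (m.insert oi t) (t + 1) := by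
  induction rest with
  | nil => intro oi v m t; simp [pvGoB, pvGoF]
  | cons y rest' ih =>
    intro oi v m t
    obtain ⟨oj, w⟩ := y
    by_cases h : w = v
    · subst h; simp [pvGoB, pvGoF, add_sub_cancel_right]
    · simp only [pvGoB, pvGoF, if_neg h]
      exact ih oj w (m.insert oi t) (t + 1)

-- the main invariant: from a "blocked" state (empty line, or last slot already merged) A's fold
-- computes pvGoB; from a "fresh" state (last slot (t-1, v) not merged) it computes pvGoF
lemma pvMain : ∀ (xs : List (Int × Int)) (m : PySem.Dict Int Int) (s : PySem.Set Int)
    (nl : List (Int × Int)) (t : Int), (∀ u ∈ s, u < t) →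
    ((nl = [] ∨ ∃ l pt pv, nl = l ++ [(pt, pv)] ∧ pt ∈ s) →
       (xs.foldl pvStepA (m, s, nl, t)).1 = pvGoB xs m t)
    ∧ (∀ l v, nl = l ++ [(t - 1, v)] → (t - 1) ∉ s →
       (xs.foldl pvStepA (m, s, nl, t)).1 = pvGoF xs v m t) := by
  intro xs
  induction xs with
  | nil =>
    intro m s nl t _
    exact ⟨fun _ => by simp [pvGoB], fun _ _ _ _ => by simp [pvGoF]⟩
  | cons x xs' ih =>
    intro m s nl t hinv
    obtain ⟨oi, v⟩ := x
    have hfresh : ∀ (m' : PySem.Dict Int Int) (nl' : List (Int × Int)) (w : Int),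
        (xs'.foldl pvStepA (m', s, nl' ++ [(t, w)], t + 1)).1 = pvGoF xs' w m' (t + 1) := by
      intro m' nl' w
      refine (ih m' s (nl' ++ [(t, w)]) (t + 1) (fun u hu => by have := hinv u hu; omega)).2
        nl' w (by simp) (fun hmem => by have := hinv _ hmem; omega)
    constructor
    · rintro (hnil | ⟨l, pt, pv, hnl, hpt⟩)
      · subst hnil
        show (xs'.foldl pvStepA (pvStepA (m, s, [], t) (oi, v))).1 = _
        rw [pvGoB_cons_eq_goF]
        simpa [pvStepA] using hfresh (m.insert oi t) [] v
      · subst hnl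
        show (xs'.foldl pvStepA (pvStepA (m, s, l ++ [(pt, pv)], t) (oi, v))).1 = _
        rw [pvGoB_cons_eq_goF]
        have hstep : pvStepA (m, s, l ++ [(pt, pv)], t) (oi, v)
            = (m.insert oi t, s, (l ++ [(pt, pv)]) ++ [(t, v)], t + 1) := by
          simp [pvStepA, PySem.List.pyGet?_neg_one, hpt]
        rw [hstep]
        exact hfresh (m.insert oi t) (l ++ [(pt, pv)]) v
    · intro l w hnl hnot
      subst hnl
      show (xs'.foldl pvStepA (pvStepA (m, s, l ++ [(t - 1, w)], t) (oi, v))).1 = _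
      by_cases h : w = v
      · have hstep : pvStepA (m, s, l ++ [(t - 1, w)], t) (oi, v)
            = (m.insert oi (t - 1), s.add (t - 1), l ++ [(t - 1, w * 2)], t) := by
          simp [pvStepA, PySem.List.pyGet?_neg_one, h, hnot]
        rw [hstep]
        have hinv' : ∀ u ∈ s.add (t - 1), u < t := by
          intro u hu
          rcases (PySem.Set.mem_add _ _ _).1 hu with h' | h'
          · exact hinv u h'
          · omega
        rw [(ih (m.insert oi (t - 1)) (s.add (t - 1)) (l ++ [(t - 1, w * 2)]) t hinv').1
            (Or.inr ⟨l, t - 1, w * 2, rfl, (PySem.Set.mem_add _ _ _).2 (Or.inr rfl)⟩)]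
        simp [pvGoF, h]
      · have hstep : pvStepA (m, s, l ++ [(t - 1, w)], t) (oi, v)
            = (m.insert oi t, s, (l ++ [(t - 1, w)]) ++ [(t, v)], t + 1) := by
          simp [pvStepA, PySem.List.pyGet?_neg_one, h, hnot]
        rw [hstep]
        have hvw : ¬ v = w := fun hh => h hh.symm
        simpa [pvGoF, hvw] using hfresh (m.insert oi t) (l ++ [(t - 1, w)]) v

-- ===== VERDICT (by name: the statement is the Claim_ definition above) =====
theorem get_1d_mapping_spec : Claim_equal_get_1d_mapping := by
  intro xs _
  show get_1d_mapping xs = get_1d_mapping_alt xs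
  unfold get_1d_mapping get_1d_mapping_alt
  rw [(pvMain xs PySem.Dict.empty PySem.Set.empty [] 0 (by intro u hu; cases hu)).1 (Or.inl rfl)]
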